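-- pv_equiv track=rewrite | github.com/Pascamel/adventOfCode | 2018/advent6.py | biggest_surface
-- ===== SOURCE A (Python) =====
-- def biggest_surface(grid):
--   counters = {}
--   for row, line_data in enumerate(grid):
--     for line, case in enumerate(line_data):
--       if case[0] == 'P':
--         counters[case[1:]] = 1;
--
--   for row, line_data in enumerate(grid):
--     for line, case in enumerate(line_data):
--       if case[0] != 'P' and case[0] != '-':
--         counters[case] += 1;
--
--   for row, line_data in enumerate(grid):
--     if line_data[0][0] != 'P' and line_data[0][0] != '-':
--       counters.pop(line_data[0], None)
--     if line_data[len(line_data) - 1][0] != 'P' and line_data[len(line_data) - 1][0] != '-':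
--       counters.pop(line_data[len(line_data) - 1], None)
--
--   for col, case in enumerate(grid[0]):
--     if case[0] != 'P' and case[0] != '-':
--       counters.pop(case, None)
--
--   for col, case in enumerate(grid[len(grid) - 1]):
--     if case[0] != 'P' and case[0] != '-':
--       counters.pop(case, None)
--
--   return max(counters.items(), key=(lambda key: key[1]))[1]
-- ===== SOURCE B (Python) =====
-- def biggest_surface(grid):
--   seeds = set()
--   body = []
--   for row in grid:
--     for case in row:
--       if case[0] == 'P':
--         seeds.add(case[1:])
--       elif case[0] != '-':
--         body.append(case)
--
--   infinite = set()
--   for case in grid[0] + grid[-1]: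
--     if case[0] != 'P' and case[0] != '-':
--       infinite.add(case)
--   for row in grid:
--     for case in (row[0], row[-1]):
--       if case[0] != 'P' and case[0] != '-':
--         infinite.add(case)
--
--   tokens = sorted(body + list(seeds))
--   best = None
--   i = 0
--   while i < len(tokens):
--     j = i
--     while j < len(tokens) and tokens[j] == tokens[i]:
--       j += 1
--     if tokens[i] not in infinite and (best is None or j - i > best):
--       best = j - i
--     i = j
--   return best
-- ===== Notes on version B (the rewrite author's own statement) =====
-- stated objective: alternative
-- what changed: B replaces A's dict of counters (seed-to-1, guarded increment, four conditional pop edge scans, keyed max over items) by a sort-then-scan algorithm: all area tokens (seed labels once plus every labeled cell) are sorted, equal runs are measured in one linear sweep, and the longest run whose label is not in a perimeter exclusion set is returned.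
import Mathlib
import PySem

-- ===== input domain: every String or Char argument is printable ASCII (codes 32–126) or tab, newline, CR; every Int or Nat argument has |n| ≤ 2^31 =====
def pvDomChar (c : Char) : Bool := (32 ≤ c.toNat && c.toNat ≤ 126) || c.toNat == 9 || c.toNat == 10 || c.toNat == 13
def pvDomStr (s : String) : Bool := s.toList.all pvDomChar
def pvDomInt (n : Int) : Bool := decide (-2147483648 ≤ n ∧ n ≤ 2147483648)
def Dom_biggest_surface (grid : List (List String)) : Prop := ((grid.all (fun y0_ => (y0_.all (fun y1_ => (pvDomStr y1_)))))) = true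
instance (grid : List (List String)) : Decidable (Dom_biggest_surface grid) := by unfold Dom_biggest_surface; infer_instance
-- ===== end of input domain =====

-- B replaces A's dict counting with four conditional pop edge scans and a keyed max by a
-- sort-then-scan: all area tokens are sorted and equal runs are measured in one linear sweep,
-- keeping the best run whose label is not in a perimeter exclusion set (objective: alternative).
-- Inputs on which the Python A raises (IndexError/KeyError/ValueError) are excluded by Pre_.

-- shared tiny helpers for Python's case[0] and case[1:] (empty strings are excluded by Pre_)
def hd0 (s : String) : Char := s.toList.headD '?'          -- case[0]; IndexError on "" excluded by Pre_
def tail1 (s : String) : String := String.ofList (s.toList.drop 1)  -- case[1:]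

-- ===== PORT A =====
def biggest_surface (grid : List (List String)) : Int :=
  -- pass 1: seed counters[case[1:]] = 1 for every P-cell
  let d1 : PySem.Dict String Int :=
    grid.foldl (fun d line_data => line_data.foldl (fun d case =>
      if hd0 case == 'P' then d.insert (tail1 case) 1 else d) d) PySem.Dict.empty
  -- pass 2: counters[case] += 1 for labeled cells (KeyError on a missing seed: excluded by Pre_)
  let d2 : PySem.Dict String Int :=
    grid.foldl (fun d line_data => line_data.foldl (fun d case =>
      if hd0 case ≠ 'P' ∧ hd0 case ≠ '-' then
        match d.get? case with
        | some v => d.insert case (v + 1)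
        | none => d
      else d) d) d1
  -- pass 3: pop line_data[0] and line_data[len-1] per row (IndexError on empty row: excluded by Pre_)
  let d3 : PySem.Dict String Int :=
    grid.foldl (fun d line_data =>
      let c0 := line_data.headD ""
      let d' := if hd0 c0 ≠ 'P' ∧ hd0 c0 ≠ '-' then d.erase c0 else d
      let c1 := line_data.getLastD ""
      if hd0 c1 ≠ 'P' ∧ hd0 c1 ≠ '-' then d'.erase c1 else d') d2
  -- pass 4: pop cells of grid[0] (IndexError on empty grid: excluded by Pre_)
  let d4 : PySem.Dict String Int :=
    (grid.headD []).foldl (fun d case =>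
      if hd0 case ≠ 'P' ∧ hd0 case ≠ '-' then d.erase case else d) d3
  -- pass 5: pop cells of grid[len-1]
  let d5 : PySem.Dict String Int :=
    (grid.getLastD []).foldl (fun d case =>
      if hd0 case ≠ 'P' ∧ hd0 case ≠ '-' then d.erase case else d) d4
  -- max(counters.items(), key=value)[1]  (ValueError on empty dict: excluded by Pre_)
  match PySem.List.max? d5.items (fun kv => kv.2) with
  | some kv => kv.2
  | none => 0

-- ===== PORT B =====
-- the two nested while loops of Source B: consume the leading run of equal tokens, remember the
-- longest run whose label is outside `infinite`, continue on the remaining suffix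
def better (best : Option Int) (run : Int) : Bool :=
  match best with | none => true | some b => decide (run > b)

def runScan (infinite : PySem.Set String) (best : Option Int) : List String → Option Int
  | [] => best
  | t :: rest =>
      let run : Int := 1 + ((rest.takeWhile (fun x => x == t)).length : Int)
      let best' : Option Int :=
        if !(List.contains infinite t) && better best run then some run else best
      runScan infinite best' (rest.dropWhile (fun x => x == t))
  termination_by l => l.length
  decreasing_by
    simp only [List.length_cons]
    exact Nat.lt_succ_of_le (List.Sublist.length_le (List.dropWhile_sublist _))

def biggest_surface_alt (grid : List (List String)) : Int :=
  -- one pass: the seed-label set and the list of labeled body cells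
  let st : PySem.Set String × List String :=
    grid.foldl (fun st row => row.foldl (fun st case =>
      if hd0 case == 'P' then (st.1.add (tail1 case), st.2)
      else if hd0 case == '-' then st
      else (st.1, st.2 ++ [case])) st) (PySem.Set.empty, [])
  -- labels on the perimeter bound no finite region
  let inf1 : PySem.Set String :=
    (grid.headD [] ++ grid.getLastD []).foldl (fun s case =>
      if hd0 case ≠ 'P' ∧ hd0 case ≠ '-' then s.add case else s) PySem.Set.empty
  let infinite : PySem.Set String :=
    grid.foldl (fun s row =>
      [row.headD "", row.getLastD ""].foldl (fun s case =>
        if hd0 case ≠ 'P' ∧ hd0 case ≠ '-' then s.add case else s) s) inf1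
  -- tokens = sorted(body + list(seeds)); best run = biggest bounded area (B returns None → not in Pre_)
  let tokens : List String := PySem.List.sorted (st.2 ++ st.1) (fun x => x) false
  (runScan infinite none tokens).getD 0

-- ===== PRECONDITION & SPEC =====
-- the perimeter cells of the grid (first/last row, first/last cell of each row)
def perimOf (grid : List (List String)) : List String :=
  grid.headD [] ++ grid.getLastD [] ++ grid.map (fun r => r.headD "") ++ grid.map (fun r => r.getLastD "")

-- Pre_ = exactly the inputs on which A returns: nonempty grid, rows and cells (else IndexError),
-- every labeled cell has a matching P seed (else KeyError), and some seeded label is not a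
-- labeled perimeter cell (else ValueError on max of an empty dict).
def Pre_biggest_surface (grid : List (List String)) : Prop :=
  grid ≠ [] ∧ (∀ row ∈ grid, row ≠ []) ∧ (∀ row ∈ grid, ∀ c ∈ row, c ≠ "") ∧
  (∀ row ∈ grid, ∀ c ∈ row, hd0 c ≠ 'P' → hd0 c ≠ '-' →
      ∃ r' ∈ grid, ∃ s ∈ r', hd0 s = 'P' ∧ tail1 s = c) ∧
  (∃ r ∈ grid, ∃ s ∈ r, hd0 s = 'P' ∧
      ∀ p ∈ perimOf grid, hd0 p ≠ 'P' → hd0 p ≠ '-' → p ≠ tail1 s)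
instance (grid : List (List String)) : Decidable (Pre_biggest_surface grid) := by
  unfold Pre_biggest_surface; infer_instance

def pvWitness_biggest_surface : List (List String) :=
  [["Pa", "-", "-"], ["-", "a", "-"], ["-", "-", "-"]]

def Spec_biggest_surface (grid : List (List String)) (out : Int) : Prop := out = biggest_surface_alt grid
instance (grid : List (List String)) (out : Int) : Decidable (Spec_biggest_surface grid out) := by unfold Spec_biggest_surface; infer_instance

-- ===== CLAIM (what is proved, stated in full; the proofs are below) =====
def Claim_equal_biggest_surface : Prop := ∀ (grid : List (List String)), Dom_biggest_surface grid → Pre_biggest_surface grid → Spec_biggest_surface grid (biggest_surface grid)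

-- ===== LEMMAS AND PROOFS =====

-- proof-only names for the stages the two algorithms factor through
def labelsOf (grid : List (List String)) : List String :=
  ((grid.flatten).filter (fun c => hd0 c == 'P')).map tail1

def lcntOf (grid : List (List String)) : List String :=
  (grid.flatten).filter (fun c => decide (hd0 c ≠ 'P' ∧ hd0 c ≠ '-'))

def edgeA (grid : List (List String)) : List String :=
  grid.flatMap (fun ld => [ld.headD "", ld.getLastD ""]) ++ grid.headD [] ++ grid.getLastD []

def edgeB (grid : List (List String)) : List String :=
  (grid.headD [] ++ grid.getLastD []) ++ grid.flatMap (fun r => [r.headD "", r.getLastD ""])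

def dA1 (grid : List (List String)) : PySem.Dict String Int :=
  (labelsOf grid).foldl (fun d c => d.insert c 1) PySem.Dict.empty

def dA2 (grid : List (List String)) : PySem.Dict String Int :=
  (lcntOf grid).foldl (fun d c => d.modify c 0 (· + 1)) (dA1 grid)

def dA5 (grid : List (List String)) : PySem.Dict String Int :=
  (edgeA grid).foldl (fun d c => if hd0 c ≠ 'P' ∧ hd0 c ≠ '-' then d.erase c else d) (dA2 grid)

def infB (grid : List (List String)) : PySem.Set String :=
  (edgeB grid).foldl (fun s c => if hd0 c ≠ 'P' ∧ hd0 c ≠ '-' then s.add c else s) PySem.Set.empty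

def toksOf (grid : List (List String)) : List String :=
  PySem.List.sorted (lcntOf grid ++ PySem.Set.ofList (labelsOf grid)) (fun x => x) false

theorem get?_erase' (d : PySem.Dict String Int) (k k' : String) :
    (d.erase k).get? k' = if k' = k then none else d.get? k' := by
  obtain ⟨l⟩ := d
  simp only [PySem.Dict.erase, PySem.Dict.get?, List.find?_filter]
  by_cases hk : k' = k
  · subst hk
    rw [List.find?_eq_none.2 (by intro a ha; simp)]
    simp
  · rw [if_neg hk]
    have : (fun (a : String × Int) => decide ((!a.1 == k) = true ∧ (a.1 == k') = true))
        = (fun (p : String × Int) => p.1 == k') := by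
      funext a
      by_cases h : a.1 = k'
      · simp [h, hk]
      · simp [h]
    rw [this]

theorem seed_get? (l : List String) (d : PySem.Dict String Int) (k : String) :
    (l.foldl (fun d c => d.insert c (1:Int)) d).get? k = if k ∈ l then some 1 else d.get? k := by
  induction l generalizing d with
  | nil => simp
  | cons c t ih =>
    simp only [List.foldl_cons, ih, List.mem_cons]
    by_cases ht : k ∈ t
    · simp [ht]
    · by_cases hc : k = c
      · subst hc; simp [ht, PySem.Dict.get?_insert_self]
      · simp [ht, hc, PySem.Dict.get?_insert_of_ne d 1 hc]

theorem matchFold (l : List String) (d : PySem.Dict String Int)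
    (h : ∀ c ∈ l, (d.get? c).isSome = true) :
    l.foldl (fun d c => match d.get? c with | some v => d.insert c (v + 1) | none => d) d
      = l.foldl (fun d c => d.modify c 0 (· + 1)) d := by
  induction l generalizing d with
  | nil => rfl
  | cons c t ih =>
    obtain ⟨v, hv⟩ := Option.isSome_iff_exists.1 (h c (List.mem_cons_self))
    have hstep : (match d.get? c with | some v => d.insert c (v + 1) | none => d)
        = d.modify c 0 (· + 1) := by
      rw [hv]
      simp only [PySem.Dict.modify, PySem.Dict.getD_of_get?_eq_some d 0 hv]
    rw [List.foldl_cons, List.foldl_cons, hstep]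
    apply ih
    intro c' hc'
    have hc2 := h c' (List.mem_cons_of_mem _ hc')
    rw [← PySem.Dict.contains_eq_isSome_get?] at hc2 ⊢
    rw [PySem.Dict.contains_modify]
    simp [hc2]

theorem eraseFold (l : List String) (d : PySem.Dict String Int) (k : String) :
    (l.foldl (fun d c => if hd0 c ≠ 'P' ∧ hd0 c ≠ '-' then d.erase c else d) d).get? k
      = if k ∈ l ∧ (hd0 k ≠ 'P' ∧ hd0 k ≠ '-') then none else d.get? k := by
  induction l generalizing d with
  | nil => simp
  | cons c t ih =>
    rw [List.foldl_cons, ih]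
    by_cases ht : k ∈ t ∧ (hd0 k ≠ 'P' ∧ hd0 k ≠ '-')
    · simp [ht.1, ht.2]
    · rw [if_neg ht]
      by_cases hc : hd0 c ≠ 'P' ∧ hd0 c ≠ '-'
      · rw [if_pos hc, get?_erase']
        by_cases hkc : k = c
        · subst hkc; simp [hc]
        · simp only [if_neg hkc]
          rw [if_neg]
          rintro ⟨hmem, hlab⟩
          rcases List.mem_cons.1 hmem with h | h
          · exact hkc h
          · exact ht ⟨h, hlab⟩
      · rw [if_neg hc, if_neg]
        rintro ⟨hmem, hlab⟩
        rcases List.mem_cons.1 hmem with h | h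
        · subst h; exact hc hlab
        · exact ht ⟨h, hlab⟩

theorem addFold (l : List String) (s : PySem.Set String) (k : String) :
    (k ∈ l.foldl (fun s c => if hd0 c ≠ 'P' ∧ hd0 c ≠ '-' then s.add c else s) s)
      ↔ k ∈ s ∨ (k ∈ l ∧ (hd0 k ≠ 'P' ∧ hd0 k ≠ '-')) := by
  induction l generalizing s with
  | nil => simp
  | cons c t ih =>
    rw [List.foldl_cons, ih]
    by_cases hc : hd0 c ≠ 'P' ∧ hd0 c ≠ '-'
    · rw [if_pos hc, PySem.Set.mem_add]
      constructor
      · rintro (⟨h | h⟩ | h)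
        · exact Or.inl h
        · subst h; exact Or.inr ⟨List.mem_cons_self, hc⟩
        · exact Or.inr ⟨List.mem_cons_of_mem _ h.1, h.2⟩
      · rintro (h | ⟨hmem, hlab⟩)
        · exact Or.inl (Or.inl h)
        · rcases List.mem_cons.1 hmem with h | h
          · exact Or.inl (Or.inr h)
          · exact Or.inr ⟨h, hlab⟩
    · rw [if_neg hc]
      constructor
      · rintro (h | h)
        · exact Or.inl h
        · exact Or.inr ⟨List.mem_cons_of_mem _ h.1, h.2⟩
      · rintro (h | ⟨hmem, hlab⟩)
        · exact Or.inl h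
        · rcases List.mem_cons.1 hmem with h | h
          · subst h; exact absurd hlab hc
          · exact Or.inr ⟨h, hlab⟩

theorem erase_keys_sublist (d : PySem.Dict String Int) (k : String) :
    (d.erase k).keys.Sublist d.keys := by
  obtain ⟨l⟩ := d
  have hs : (List.filter (fun p => !p.1 == k) l).Sublist l := List.filter_sublist
  simpa [PySem.Dict.erase, PySem.Dict.keys] using hs.map (fun p => p.1)

theorem eraseFold_nodup (l : List String) (d : PySem.Dict String Int) (h : d.keys.Nodup) :
    ((l.foldl (fun d c => if hd0 c ≠ 'P' ∧ hd0 c ≠ '-' then d.erase c else d) d).keys).Nodup := by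
  induction l generalizing d with
  | nil => exact h
  | cons c t ih =>
    rw [List.foldl_cons]
    apply ih
    by_cases hc : hd0 c ≠ 'P' ∧ hd0 c ≠ '-'
    · rw [if_pos hc]; exact (erase_keys_sublist d c).nodup h
    · rw [if_neg hc]; exact h

def pyMaxSnd (l : List (String × Int)) : Int :=
  match PySem.List.max? l (fun kv => kv.2) with
  | some kv => kv.2
  | none => 0

theorem A_decomp (grid : List (List String))
    (h : ∀ c ∈ lcntOf grid, (dA1 grid).get? c ≠ none) :
    biggest_surface grid = pyMaxSnd (dA5 grid).items := by
  have e1 : grid.foldl (fun d line_data => line_data.foldl (fun d case =>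
      if hd0 case == 'P' then d.insert (tail1 case) 1 else d) d) PySem.Dict.empty = dA1 grid := by
    rw [← List.foldl_flatten, PySem.List.foldl_if_eq_foldl_filter]
    unfold dA1 labelsOf
    rw [List.foldl_map]
  have e2 : grid.foldl (fun d line_data => line_data.foldl (fun d case =>
      if hd0 case ≠ 'P' ∧ hd0 case ≠ '-' then
        match d.get? case with
        | some v => d.insert case (v + 1)
        | none => d
      else d) d) (dA1 grid) = dA2 grid := by
    rw [← List.foldl_flatten,
      PySem.List.foldl_ite_eq_foldl_filter (fun case => hd0 case ≠ 'P' ∧ hd0 case ≠ '-')]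
    unfold dA2 lcntOf
    exact matchFold _ _ (fun c hc => by
      rw [Option.isSome_iff_ne_none]
      exact h c hc)
  have e3 : grid.foldl (fun d line_data =>
      let c0 := line_data.headD ""
      let d' := if hd0 c0 ≠ 'P' ∧ hd0 c0 ≠ '-' then d.erase c0 else d
      let c1 := line_data.getLastD ""
      if hd0 c1 ≠ 'P' ∧ hd0 c1 ≠ '-' then d'.erase c1 else d') (dA2 grid)
      = (grid.flatMap (fun ld => [ld.headD "", ld.getLastD ""])).foldl
          (fun d c => if hd0 c ≠ 'P' ∧ hd0 c ≠ '-' then d.erase c else d) (dA2 grid) := by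
    rw [List.flatMap_def, List.foldl_flatten, List.foldl_map]
    rfl
  have e5 : dA5 grid = (grid.getLastD []).foldl
      (fun d c => if hd0 c ≠ 'P' ∧ hd0 c ≠ '-' then d.erase c else d)
      ((grid.headD []).foldl (fun d c => if hd0 c ≠ 'P' ∧ hd0 c ≠ '-' then d.erase c else d)
        ((grid.flatMap (fun ld => [ld.headD "", ld.getLastD ""])).foldl
          (fun d c => if hd0 c ≠ 'P' ∧ hd0 c ≠ '-' then d.erase c else d) (dA2 grid))) := by
    unfold dA5 edgeA
    rw [List.foldl_append, List.foldl_append]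
  unfold biggest_surface
  simp only [e1, e2, e3, e5]
  rfl

theorem pair_splitB (l : List String) (s : PySem.Set String) (b : List String) :
    l.foldl (fun st case =>
      (if hd0 case == 'P' then st.1.add (tail1 case) else st.1,
       if hd0 case ≠ 'P' ∧ hd0 case ≠ '-' then st.2 ++ [case] else st.2)) (s, b)
    = (l.foldl (fun s case => if hd0 case == 'P' then s.add (tail1 case) else s) s,
       l.foldl (fun b case => if hd0 case ≠ 'P' ∧ hd0 case ≠ '-' then b ++ [case] else b) b) := by
  induction l generalizing s b with
  | nil => rfl
  | cons c t ih =>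
    simp only [List.foldl_cons]
    exact ih _ _

theorem appendFold (l : List String) (b : List String) :
    l.foldl (fun b case => if hd0 case ≠ 'P' ∧ hd0 case ≠ '-' then b ++ [case] else b) b
      = b ++ l.filter (fun c => decide (hd0 c ≠ 'P' ∧ hd0 c ≠ '-')) := by
  induction l generalizing b with
  | nil => simp
  | cons c t ih =>
    rw [List.foldl_cons, ih]
    by_cases hc : hd0 c ≠ 'P' ∧ hd0 c ≠ '-'
    · simp [hc]
    · simp [hc]

theorem B_decomp (grid : List (List String)) :
    biggest_surface_alt grid = (runScan (infB grid) none (toksOf grid)).getD 0 := by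
  have f1 : grid.foldl (fun st row => row.foldl
      (fun (st : PySem.Set String × List String) case =>
        if hd0 case == 'P' then (st.1.add (tail1 case), st.2)
        else if hd0 case == '-' then st
        else (st.1, st.2 ++ [case])) st) (PySem.Set.empty, [])
      = (PySem.Set.ofList (labelsOf grid), lcntOf grid) := by
    rw [← List.foldl_flatten]
    have hbody : (fun (st : PySem.Set String × List String) case =>
        if hd0 case == 'P' then (st.1.add (tail1 case), st.2)
        else if hd0 case == '-' then st
        else (st.1, st.2 ++ [case]))
      = (fun st case =>
          (if hd0 case == 'P' then st.1.add (tail1 case) else st.1,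
           if hd0 case ≠ 'P' ∧ hd0 case ≠ '-' then st.2 ++ [case] else st.2)) := by
      funext st case
      by_cases h1 : hd0 case = 'P'
      · simp [h1]
      · by_cases h2 : hd0 case = '-'
        · simp [h2]
        · simp [h1, h2]
    rw [hbody, pair_splitB]
    rw [Prod.mk.injEq]
    constructor
    · rw [PySem.List.foldl_if_eq_foldl_filter]
      unfold labelsOf PySem.Set.ofList
      rw [List.foldl_map]
    · rw [appendFold]
      rfl
  have f3 : grid.foldl (fun s row =>
      [row.headD "", row.getLastD ""].foldl (fun s case =>
        if hd0 case ≠ 'P' ∧ hd0 case ≠ '-' then s.add case else s) s)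
      ((grid.headD [] ++ grid.getLastD []).foldl (fun s case =>
        if hd0 case ≠ 'P' ∧ hd0 case ≠ '-' then s.add case else s) PySem.Set.empty)
      = infB grid := by
    unfold infB edgeB
    conv_rhs => rw [List.foldl_append]
    conv_rhs => rw [List.flatMap_def, List.foldl_flatten, List.foldl_map]
  unfold biggest_surface_alt
  simp only [f1, f3]
  rfl

-- the run lengths runScan sees, per distinct leading token (proof-only)
def cands (inf : PySem.Set String) : List String → List Int
  | [] => []
  | t :: rest =>
      (if List.contains inf t then [] else [1 + ((rest.takeWhile (fun x => x == t)).length : Int)])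
        ++ cands inf (rest.dropWhile (fun x => x == t))
  termination_by l => l.length
  decreasing_by
    simp only [List.length_cons]
    exact Nat.lt_succ_of_le (List.Sublist.length_le (List.dropWhile_sublist _))

def stepB (b : Option Int) (c : Int) : Option Int :=
  if better b c then some c else b

theorem runScan_nil (inf : PySem.Set String) (best : Option Int) : runScan inf best [] = best := by
  rw [runScan]

theorem runScan_cons (inf : PySem.Set String) (best : Option Int) (t : String) (rest : List String) :
    runScan inf best (t :: rest) =
      runScan inf
        (if !(List.contains inf t) && better best (1 + ((rest.takeWhile (fun x => x == t)).length : Int))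
         then some (1 + ((rest.takeWhile (fun x => x == t)).length : Int)) else best)
        (rest.dropWhile (fun x => x == t)) := by
  rw [runScan]

theorem cands_nil (inf : PySem.Set String) : cands inf [] = [] := by
  rw [cands]

theorem cands_cons (inf : PySem.Set String) (t : String) (rest : List String) :
    cands inf (t :: rest) =
      (if List.contains inf t then [] else [1 + ((rest.takeWhile (fun x => x == t)).length : Int)])
        ++ cands inf (rest.dropWhile (fun x => x == t)) := by
  rw [cands]

theorem runScan_eq_foldl_aux (inf : PySem.Set String) : ∀ (n : Nat) (ts : List String),
    ts.length ≤ n → ∀ (best : Option Int),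
    runScan inf best ts = (cands inf ts).foldl stepB best := by
  intro n
  induction n with
  | zero =>
    intro ts h best
    cases ts with
    | nil => rw [runScan_nil, cands_nil]; rfl
    | cons t rest => simp at h
  | succ n ihn =>
    intro ts h best
    cases ts with
    | nil => rw [runScan_nil, cands_nil]; rfl
    | cons t rest =>
      have hlen : (rest.dropWhile (fun x => x == t)).length ≤ n := by
        have := List.Sublist.length_le (List.dropWhile_sublist (p := fun x => x == t) (l := rest))
        simp only [List.length_cons] at h
        omega
      rw [runScan_cons, cands_cons]
      by_cases hc : List.contains inf t
      · rw [if_pos hc, if_neg (by rw [hc]; simp), List.nil_append]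
        exact ihn _ hlen _
      · have hcf : List.contains inf t = false := eq_false_of_ne_true hc
        rw [if_neg hc, List.singleton_append, List.foldl_cons]
        have hstep : stepB best (1 + ((rest.takeWhile (fun x => x == t)).length : Int))
            = (if !(List.contains inf t) && better best (1 + ((rest.takeWhile (fun x => x == t)).length : Int))
               then some (1 + ((rest.takeWhile (fun x => x == t)).length : Int)) else best) := by
          unfold stepB
          rw [hcf]
          simp only [Bool.not_false, Bool.true_and]
        rw [← hstep]
        exact ihn _ hlen _

theorem runScan_eq_foldl (inf : PySem.Set String) (ts : List String) (best : Option Int) :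
    runScan inf best ts = (cands inf ts).foldl stepB best :=
  runScan_eq_foldl_aux inf ts.length ts (le_refl _) best

theorem stepB_some (l : List Int) : ∀ (b : Int), l.foldl stepB (some b) = some (l.foldl max b) := by
  induction l with
  | nil => intro b; rfl
  | cons c t ih =>
    intro b
    rw [List.foldl_cons, List.foldl_cons]
    have : stepB (some b) c = some (max b c) := by
      unfold stepB better
      by_cases h : c > b
      · rw [if_pos (by simpa using h)]
        congr 1
        omega
      · rw [if_neg (by simpa using h)]
        congr 1
        omega
    rw [this, ih]

theorem foldl_max_mem (l : List Int) : ∀ (c : Int), l.foldl max c ∈ c :: l := by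
  induction l with
  | nil => intro c; simp
  | cons x t ih =>
    intro c
    rw [List.foldl_cons]
    rcases List.mem_cons.1 (ih (max c x)) with h | h
    · rcases max_choice c x with hm | hm <;> rw [h, hm]
      · simp
      · simp
    · simp [h]

theorem foldl_max_ub (l : List Int) : ∀ (c : Int), c ≤ l.foldl max c ∧ ∀ x ∈ l, x ≤ l.foldl max c := by
  induction l with
  | nil => intro c; simp
  | cons y t ih =>
    intro c
    obtain ⟨h1, h2⟩ := ih (max c y)
    rw [List.foldl_cons]
    refine ⟨le_trans (le_max_left _ _) h1, ?_⟩
    intro x hx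
    rcases List.mem_cons.1 hx with h | h
    · subst h; exact le_trans (le_max_right _ _) h1
    · exact h2 x h

theorem mem_cands (inf : PySem.Set String) : ∀ (ts : List String),
    ts.Pairwise (fun a b => a ≤ b) → ∀ (x : Int),
    (x ∈ cands inf ts ↔ ∃ k, k ∈ ts ∧ ¬ List.contains inf k ∧ x = (ts.count k : Int)) := by
  intro ts
  induction ts using cands.induct with
  | case1 =>
    intro _ x
    simp [cands]
  | case2 t rest ih =>
    intro hs x
    have hsrest : rest.Pairwise (fun a b => a ≤ b) := (List.pairwise_cons.1 hs).2
    have hle : ∀ y ∈ rest, t ≤ y := (List.pairwise_cons.1 hs).1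
    set tw := rest.takeWhile (fun x => x == t) with htw
    set rest' := rest.dropWhile (fun x => x == t) with hrest'
    have hsplit : tw ++ rest' = rest := List.takeWhile_append_dropWhile
    have htwmem : ∀ y ∈ tw, y = t := by
      intro y hy
      have := List.mem_takeWhile_imp hy
      simpa using this
    have hrest'ne : ∀ y ∈ rest', y ≠ t := by
      intro y hy
      cases hr : rest' with
      | nil => rw [hr] at hy; simp at hy
      | cons h0 tl =>
        have hh0 : ¬ (h0 == t) = true := by
          have := List.head?_dropWhile_not (fun x => x == t) rest
          rw [← hrest', hr] at this
          simpa using this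
        have hh0ne : h0 ≠ t := by simpa using hh0
        have hh0mem : h0 ∈ rest := by
          have : h0 ∈ rest' := by rw [hr]; simp
          exact (List.dropWhile_sublist _).mem this
        have hth0 : t < h0 := lt_of_le_of_ne (hle h0 hh0mem) (Ne.symm hh0ne)
        rw [hr] at hy
        rcases List.mem_cons.1 hy with h | h
        · subst h; exact hh0ne
        · have hsr' : rest'.Pairwise (fun a b => a ≤ b) := List.Pairwise.sublist (List.dropWhile_sublist _) hsrest
          have : h0 ≤ y := by
            rw [hr] at hsr'
            exact (List.pairwise_cons.1 hsr').1 y h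
          exact ne_of_gt (lt_of_lt_of_le hth0 this)
    have hsr' : rest'.Pairwise (fun a b => a ≤ b) := List.Pairwise.sublist (List.dropWhile_sublist _) hsrest
    have hcount_t : ((t :: rest).count t : Int) = 1 + (tw.length : Int) := by
      have h1 : rest.count t = tw.length := by
        rw [← hsplit, List.count_append]
        have h2 : tw.count t = tw.length := by
          rw [List.count_eq_length]
          intro b hb; exact ((htwmem b hb).symm ▸ rfl)
        have h3 : rest'.count t = 0 := by
          rw [List.count_eq_zero]
          intro hmem; exact hrest'ne t hmem rfl
        rw [h2, h3]
        omega
      rw [List.count_cons_self, h1]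
      push_cast
      ring
    have hcount_k : ∀ k ∈ rest', ((t :: rest).count k) = rest'.count k := by
      intro k hk
      have hkt : k ≠ t := hrest'ne k hk
      rw [List.count_cons_of_ne (fun h => hkt h.symm), ← hsplit, List.count_append]
      have : tw.count k = 0 := by
        rw [List.count_eq_zero]
        intro hmem; exact hkt (htwmem k hmem)
      rw [this]
      omega
    rw [cands]
    constructor
    · intro hx
      rcases List.mem_append.1 hx with h | h
      · by_cases hc : List.contains inf t
        · rw [if_pos hc] at h; simp at h
        · rw [if_neg hc] at h
          simp only [List.mem_singleton] at h
          exact ⟨t, List.mem_cons_self, by simpa using hc, by rw [h, hcount_t]⟩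
      · obtain ⟨k, hk1, hk2, hk3⟩ := (ih hsr' x).1 h
        refine ⟨k, List.mem_cons_of_mem _ ((List.dropWhile_sublist _).mem hk1), hk2, ?_⟩
        rw [hk3]
        exact_mod_cast (hcount_k k hk1).symm
    · rintro ⟨k, hk1, hk2, hk3⟩
      rcases List.mem_cons.1 hk1 with h | h
      · subst h
        apply List.mem_append.2 (Or.inl _)
        rw [if_neg (by simpa using hk2)]
        simp only [List.mem_singleton]
        rw [hk3, hcount_t]
      · -- k ∈ rest: either k ∈ tw (then k = t) or k ∈ rest'
        have : k ∈ tw ++ rest' := by rw [hsplit]; exact h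
        rcases List.mem_append.1 this with hmem | hmem
        · have hkt := htwmem k hmem
          subst hkt
          apply List.mem_append.2 (Or.inl _)
          rw [if_neg (by simpa using hk2)]
          simp only [List.mem_singleton]
          rw [hk3, hcount_t]
        · apply List.mem_append.2 (Or.inr _)
          refine (ih hsr' x).2 ⟨k, hmem, hk2, ?_⟩
          rw [hk3]
          exact_mod_cast hcount_k k hmem

theorem mem_infB (grid : List (List String)) (k : String) :
    k ∈ infB grid ↔ k ∈ edgeB grid ∧ (hd0 k ≠ 'P' ∧ hd0 k ≠ '-') := by
  unfold infB
  rw [addFold]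
  simp [PySem.Set.empty]

theorem mem_edgeA_iff_edgeB (grid : List (List String)) (k : String) :
    k ∈ edgeA grid ↔ k ∈ edgeB grid := by
  unfold edgeA edgeB
  simp only [List.mem_append, List.mem_flatMap, List.mem_cons, List.not_mem_nil, or_false]
  constructor
  · rintro ((h | h) | h)
    · exact Or.inr h
    · exact Or.inl (Or.inl h)
    · exact Or.inl (Or.inr h)
  · rintro ((h | h) | h)
    · exact Or.inl (Or.inr h)
    · exact Or.inr h
    · exact Or.inl (Or.inl h)

theorem dA1_get? (grid : List (List String)) (k : String) :
    (dA1 grid).get? k = if k ∈ labelsOf grid then some 1 else none := by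
  unfold dA1
  rw [seed_get?]
  rfl

theorem dA1_nodup (grid : List (List String)) : (dA1 grid).keys.Nodup := by
  unfold dA1
  exact PySem.Dict.nodup_keys_foldl_insert _ (fun _ _ => 1) _ (by simp [PySem.Dict.empty, PySem.Dict.keys])

theorem dA2_get? (grid : List (List String))
    (hsub : ∀ c ∈ lcntOf grid, c ∈ labelsOf grid) (k : String) :
    (dA2 grid).get? k = if k ∈ labelsOf grid then some (1 + ((lcntOf grid).count k : Int)) else none := by
  have hkeys : (dA2 grid).keys = PySem.Set.update (dA1 grid).keys (lcntOf grid) := by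
    unfold dA2
    exact PySem.Dict.keys_foldl_modify (lcntOf grid) 0 (fun _ _ v => v + 1) (dA1 grid)
  by_cases hl : k ∈ labelsOf grid
  · rw [if_pos hl]
    have hmem : k ∈ (dA2 grid).keys := by
      rw [hkeys, PySem.Set.mem_update]
      left
      have h1 := dA1_get? grid k
      rw [if_pos hl] at h1
      by_contra hnk
      rw [(PySem.Dict.get?_eq_none_iff_not_mem_keys _ _).2 hnk] at h1
      simp at h1
    have hne : (dA2 grid).get? k ≠ none := by
      intro hn
      exact (PySem.Dict.get?_eq_none_iff_not_mem_keys _ _).1 hn hmem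
    obtain ⟨v, hv⟩ := Option.ne_none_iff_exists'.1 hne
    have hgd : (dA2 grid).getD k 0 = v := PySem.Dict.getD_of_get?_eq_some _ 0 hv
    have hgd2 : (dA2 grid).getD k 0 = (dA1 grid).getD k 0 + ((lcntOf grid).count k : Int) := by
      unfold dA2
      exact PySem.Dict.getD_foldl_modify_add_one (lcntOf grid) (dA1 grid) k
    have hgd1 : (dA1 grid).getD k 0 = 1 := by
      have h1 := dA1_get? grid k
      rw [if_pos hl] at h1
      exact PySem.Dict.getD_of_get?_eq_some _ 0 h1
    rw [hv, ← hgd, hgd2, hgd1]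
  · rw [if_neg hl]
    apply (PySem.Dict.get?_eq_none_iff_not_mem_keys _ _).2
    rw [hkeys, PySem.Set.mem_update]
    rintro (h | h)
    · have h1 := dA1_get? grid k
      rw [if_neg hl] at h1
      exact (PySem.Dict.get?_eq_none_iff_not_mem_keys _ _).1 h1 h
    · exact hl (hsub k h)

theorem dA2_nodup (grid : List (List String)) : (dA2 grid).keys.Nodup := by
  unfold dA2
  exact PySem.Dict.nodup_keys_foldl_modify_key _ (fun x => x) 0 (fun _ _ v => v + 1) _ (dA1_nodup grid)

theorem dA5_get? (grid : List (List String)) (k : String) :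
    (dA5 grid).get? k = if k ∈ edgeA grid ∧ (hd0 k ≠ 'P' ∧ hd0 k ≠ '-') then none
      else (dA2 grid).get? k := by
  unfold dA5
  rw [eraseFold]

theorem dA5_nodup (grid : List (List String)) : (dA5 grid).keys.Nodup :=
  eraseFold_nodup _ _ (dA2_nodup grid)

theorem count_toks (grid : List (List String)) (k : String) (hk : k ∈ labelsOf grid) :
    ((toksOf grid).count k : Int) = 1 + ((lcntOf grid).count k : Int) := by
  unfold toksOf
  have hperm := PySem.List.sorted_perm (lcntOf grid ++ PySem.Set.ofList (labelsOf grid)) (fun x => x) false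
  rw [hperm.count_eq, List.count_append]
  have h1 : (PySem.Set.ofList (labelsOf grid)).count k = 1 := by
    have hnd : (PySem.Set.ofList (labelsOf grid) : List String).Nodup := PySem.Set.nodup_ofList _
    have hmem : k ∈ (PySem.Set.ofList (labelsOf grid) : List String) :=
      (PySem.Set.mem_ofList _ _).2 hk
    exact List.count_eq_one_of_mem hnd hmem
  rw [h1]
  push_cast
  ring

theorem mem_toks (grid : List (List String))
    (hsub : ∀ c ∈ lcntOf grid, c ∈ labelsOf grid) (k : String) :
    k ∈ toksOf grid ↔ k ∈ labelsOf grid := by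
  unfold toksOf
  rw [PySem.List.mem_sorted, List.mem_append]
  constructor
  · rintro (h | h)
    · exact hsub k h
    · exact (PySem.Set.mem_ofList _ _).1 h
  · intro h
    exact Or.inr ((PySem.Set.mem_ofList _ _).2 h)

-- ===== VERDICT (by name: the statement is the Claim_ definition above) =====
set_option maxHeartbeats 1000000 in
theorem biggest_surface_spec : Claim_equal_biggest_surface := by
  intro grid _ hpre
  obtain ⟨hg, hrow, hcell, hseed, hsurv⟩ := hpre
  have hsub : ∀ c ∈ lcntOf grid, c ∈ labelsOf grid := by
    intro c hc
    unfold lcntOf at hc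
    rw [List.mem_filter] at hc
    obtain ⟨hcc, hcond⟩ := hc
    have hcond' := of_decide_eq_true hcond
    obtain ⟨row, hrg, hcr⟩ := List.mem_flatten.1 hcc
    obtain ⟨r', hr', s, hs, hP, htail⟩ := hseed row hrg c hcr hcond'.1 hcond'.2
    unfold labelsOf
    exact List.mem_map.2 ⟨s, List.mem_filter.2 ⟨List.mem_flatten.2 ⟨r', hr', hs⟩, by simp [hP]⟩, htail⟩
  -- characterization of A's final values
  have hVA : ∀ x, x ∈ (dA5 grid).items.map (fun kv => kv.2) ↔
      ∃ k, (k ∈ labelsOf grid ∧ ¬(k ∈ edgeA grid ∧ (hd0 k ≠ 'P' ∧ hd0 k ≠ '-'))) ∧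
        x = 1 + ((lcntOf grid).count k : Int) := by
    intro x
    constructor
    · intro hx
      obtain ⟨kv, hkv, hkx⟩ := List.mem_map.1 hx
      have hget : (dA5 grid).get? kv.1 = some kv.2 := by
        rw [PySem.Dict.get?_eq_some_iff_mem_items _ _ _ (dA5_nodup grid)]
        exact hkv
      rw [dA5_get? grid kv.1] at hget
      by_cases he : kv.1 ∈ edgeA grid ∧ (hd0 kv.1 ≠ 'P' ∧ hd0 kv.1 ≠ '-')
      · rw [if_pos he] at hget; exact absurd hget (by simp)
      · rw [if_neg he, dA2_get? grid hsub] at hget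
        by_cases hl : kv.1 ∈ labelsOf grid
        · rw [if_pos hl] at hget
          exact ⟨kv.1, ⟨hl, he⟩, by rw [← hkx]; exact (Option.some.inj hget).symm⟩
        · rw [if_neg hl] at hget; exact absurd hget (by simp)
    · rintro ⟨k, ⟨hk1, hk2⟩, rfl⟩
      have hget : (dA5 grid).get? k = some (1 + ((lcntOf grid).count k : Int)) := by
        rw [dA5_get?, if_neg hk2, dA2_get? grid hsub, if_pos hk1]
      exact List.mem_map.2 ⟨(k, 1 + ((lcntOf grid).count k : Int)),
        (PySem.Dict.get?_eq_some_iff_mem_items _ _ _ (dA5_nodup grid)).1 hget, rfl⟩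
  -- characterization of B's candidate run lengths
  have hsorted : (toksOf grid).Pairwise (fun a b => a ≤ b) :=
    PySem.List.sorted_pairwise _ _
  have hVB : ∀ x, x ∈ cands (infB grid) (toksOf grid) ↔
      ∃ k, (k ∈ labelsOf grid ∧ ¬(k ∈ edgeA grid ∧ (hd0 k ≠ 'P' ∧ hd0 k ≠ '-'))) ∧
        x = 1 + ((lcntOf grid).count k : Int) := by
    intro x
    rw [mem_cands (infB grid) (toksOf grid) hsorted x]
    constructor
    · rintro ⟨k, hk1, hk2, hk3⟩
      have hklab := (mem_toks grid hsub k).1 hk1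
      refine ⟨k, ⟨hklab, ?_⟩, by rw [hk3, count_toks grid k hklab]⟩
      rw [mem_edgeA_iff_edgeB, ← mem_infB]
      simpa using hk2
    · rintro ⟨k, ⟨hk1, hk2⟩, rfl⟩
      rw [mem_edgeA_iff_edgeB, ← mem_infB] at hk2
      exact ⟨k, (mem_toks grid hsub k).2 hk1, by simpa using hk2,
        (count_toks grid k hk1).symm⟩
  -- a surviving label exists
  obtain ⟨r, hr, s, hs, hP, hfar⟩ := hsurv
  have hk0lab : tail1 s ∈ labelsOf grid := by
    unfold labelsOf
    exact List.mem_map.2 ⟨s, List.mem_filter.2 ⟨List.mem_flatten.2 ⟨r, hr, hs⟩, by simp [hP]⟩, rfl⟩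
  have hk0surv : ¬(tail1 s ∈ edgeA grid ∧ (hd0 (tail1 s) ≠ 'P' ∧ hd0 (tail1 s) ≠ '-')) := by
    rintro ⟨he, hc⟩
    have hperim : tail1 s ∈ perimOf grid := by
      unfold edgeA at he
      unfold perimOf
      rw [List.mem_append, List.mem_append] at he
      rw [List.mem_append, List.mem_append, List.mem_append]
      rcases he with (hf | h0) | hl
      · obtain ⟨a, ha, hx⟩ := List.mem_flatMap.1 hf
        rcases List.mem_cons.1 hx with h | hx2
        · exact Or.inl (Or.inr (List.mem_map.2 ⟨a, ha, h.symm⟩))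
        · rcases List.mem_cons.1 hx2 with h | hx3
          · exact Or.inr (List.mem_map.2 ⟨a, ha, h.symm⟩)
          · exact absurd hx3 (List.not_mem_nil)
      · exact Or.inl (Or.inl (Or.inl h0))
      · exact Or.inl (Or.inl (Or.inr hl))
    exact hfar (tail1 s) hperim hc.1 hc.2 rfl
  have hwit : (1 + ((lcntOf grid).count (tail1 s) : Int)) ∈ (dA5 grid).items.map (fun kv => kv.2) :=
    (hVA _).2 ⟨tail1 s, ⟨hk0lab, hk0surv⟩, rfl⟩
  have hwitB : (1 + ((lcntOf grid).count (tail1 s) : Int)) ∈ cands (infB grid) (toksOf grid) :=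
    (hVB _).2 ⟨tail1 s, ⟨hk0lab, hk0surv⟩, rfl⟩
  -- both sides are the maximum of membership-equal nonempty lists
  show biggest_surface grid = biggest_surface_alt grid
  rw [A_decomp grid (by intro c hc; rw [dA1_get? grid c, if_pos (hsub c hc)]; simp),
    B_decomp grid, runScan_eq_foldl]
  cases hcs : cands (infB grid) (toksOf grid) with
  | nil => rw [hcs] at hwitB; simp at hwitB
  | cons c0 cr =>
    rw [List.foldl_cons]
    have hstep0 : stepB none c0 = some c0 := rfl
    rw [hstep0, stepB_some]
    set m := cr.foldl max c0 with hm
    have hmmem : m ∈ cands (infB grid) (toksOf grid) := by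
      rw [hcs]; exact foldl_max_mem cr c0
    have hmub : ∀ x ∈ cands (infB grid) (toksOf grid), x ≤ m := by
      intro x hx
      rw [hcs] at hx
      rcases List.mem_cons.1 hx with h | h
      · subst h; exact (foldl_max_ub cr x).1
      · exact (foldl_max_ub cr c0).2 x h
    -- A's side: pyMaxSnd of items
    unfold pyMaxSnd
    cases hmax : PySem.List.max? (dA5 grid).items (fun kv => kv.2) with
    | none =>
      have : (dA5 grid).items = [] := (PySem.List.max?_eq_none_iff _ _).1 hmax
      rw [this] at hwit; simp at hwit
    | some kv =>
      have hkvmem : kv.2 ∈ (dA5 grid).items.map (fun kv => kv.2) :=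
        List.mem_map.2 ⟨kv, PySem.List.max?_mem hmax, rfl⟩
      have h1 : kv.2 ≤ m := hmub kv.2 ((hVB _).2 ((hVA _).1 hkvmem))
      have h2 : m ≤ kv.2 := by
        obtain ⟨kv', hkv', hkv'2⟩ := List.mem_map.1 ((hVA _).2 ((hVB _).1 hmmem))
        have := PySem.List.max?_isMax hmax kv' hkv'
        simp only at this
        omega
      have : kv.2 = m := le_antisymm h1 h2
      exact this
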